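-- pv_equiv track=rewrite | github.com/DhuhaAA/Algorthims_visualizer | streamlit_app.py | radix_sort_steps
-- ===== SOURCE A (Python) =====
-- from typing import Generator, List, Optional, Tuple
--
-- def radix_sort_steps(arr: List[int]) -> Generator[Tuple[List[int], Tuple[int, int]], None, None]:
--     """
--     LSD radix for non-negative ints. Yields once per digit-pass.
--     """
--     a = arr[:]
--     if any(x < 0 for x in a):
--         raise ValueError("Radix here supports non-negative integers only.")
--     if not a:
--         yield a[:], (-1, -1)
--         return
--
--     exp = 1
--     max_val = max(a)
--
--     while max_val // exp > 0:
--         n = len(a)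
--         output = [0] * n
--         count = [0] * 10
--
--         for x in a:
--             digit = (x // exp) % 10
--             count[digit] += 1
--
--         for i in range(1, 10):
--             count[i] += count[i - 1]
--
--         for i in range(n - 1, -1, -1):
--             digit = (a[i] // exp) % 10
--             output[count[digit] - 1] = a[i]
--             count[digit] -= 1
--
--         a = output[:]
--         yield a[:], (-1, -1)
--         exp *= 10
--
--     yield a[:], (-1, -1)
-- ===== SOURCE B (Python) =====
-- from typing import Generator, List, Tuple
--
-- def radix_sort_steps(arr: List[int]) -> Generator[Tuple[List[int], Tuple[int, int]], None, None]:
--     """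
--     LSD radix for non-negative ints. Yields once per digit-pass.
--     The number of passes (digits of the max) is computed up front; each pass
--     distributes into ten buckets (forward, stable) and concatenates them,
--     replacing the count/prefix-sum/backward-placement scheme.
--     """
--     a = list(arr)
--     if any(x < 0 for x in a):
--         raise ValueError("Radix here supports non-negative integers only.")
--     if not a:
--         yield a[:], (-1, -1)
--         return
--
--     passes = 0
--     m = max(a)
--     while m > 0:
--         passes += 1
--         m //= 10
--
--     for k in range(passes):
--         exp = 10 ** k
--         buckets = [[] for _ in range(10)]
--         for x in a:
--             buckets[x // exp % 10].append(x)
--         a = [x for b in buckets for x in b]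
--         yield a[:], (-1, -1)
--
--     yield a[:], (-1, -1)
-- ===== Notes on version B (the rewrite author's own statement) =====
-- stated objective: alternative
-- what changed: The pass count (digit count of the max) is computed up front and iterated with a for-loop over precomputed powers of ten, and each digit pass distributes elements forward into ten buckets and concatenates them, replacing the while-loop on max//exp and the count/prefix-sum/backward-placement counting sort.
import Mathlib
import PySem

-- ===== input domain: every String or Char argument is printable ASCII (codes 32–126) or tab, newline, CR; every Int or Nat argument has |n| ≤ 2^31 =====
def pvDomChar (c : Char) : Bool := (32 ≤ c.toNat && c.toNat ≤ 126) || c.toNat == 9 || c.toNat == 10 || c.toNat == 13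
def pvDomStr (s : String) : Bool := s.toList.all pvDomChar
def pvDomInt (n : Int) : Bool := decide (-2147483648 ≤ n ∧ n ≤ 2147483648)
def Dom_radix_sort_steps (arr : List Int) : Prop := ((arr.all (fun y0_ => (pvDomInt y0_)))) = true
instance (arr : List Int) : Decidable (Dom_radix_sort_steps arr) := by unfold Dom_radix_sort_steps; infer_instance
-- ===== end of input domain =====

-- B computes the pass count (digits of the max) up front and runs a counted for-loop over
-- powers of ten, each pass distributing forward into ten buckets and concatenating them,
-- instead of A's while-loop with count array, prefix sums and backward placement.


-- shared digit helper: (x // e) % 10, Python floor division and mod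
def pyDigit (e x : Int) : Int := PySem.Int.mod (PySem.Int.floordiv x e) 10

-- termination of A's 'while max_val // exp > 0' loop (cited by radix_loop's decreasing_by)
theorem radix_measure (maxv e : Int) (h : 0 < PySem.Int.floordiv maxv e) :
    (PySem.Int.floordiv maxv (e * 10)).toNat < (PySem.Int.floordiv maxv e).toNat := by
  rcases lt_trichotomy e 0 with he | he | he
  · have h1 := PySem.Int.floordiv_mul_add_mod maxv e
    have h2 := PySem.Int.floordiv_mul_add_mod maxv (e * 10)
    have hr := PySem.Int.mod_neg_bounds maxv he
    have hR := PySem.Int.mod_neg_bounds maxv (show e * 10 < 0 by omega)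
    have hlt : PySem.Int.floordiv maxv (e * 10) < PySem.Int.floordiv maxv e := by
      by_contra hge
      rw [not_lt] at hge
      nlinarith [mul_le_mul_of_nonpos_right hge (show e * 10 ≤ 0 by omega)]
    omega
  · subst he
    have h0 : PySem.Int.floordiv maxv 0 = 0 := by simp [PySem.Int.floordiv]
    rw [h0] at h; omega
  · have h1 := PySem.Int.floordiv_mul_add_mod maxv e
    have h2 := PySem.Int.floordiv_mul_add_mod maxv (e * 10)
    have hr1 := PySem.Int.mod_nonneg maxv he
    have hr2 := PySem.Int.mod_lt maxv he
    have hR1 := PySem.Int.mod_nonneg maxv (show (0:Int) < e * 10 by omega)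
    have hR2 := PySem.Int.mod_lt maxv (show (0:Int) < e * 10 by omega)
    have hlt : PySem.Int.floordiv maxv (e * 10) < PySem.Int.floordiv maxv e := by
      by_contra hge
      rw [not_lt] at hge
      nlinarith [mul_le_mul_of_nonneg_right hge (show (0:Int) ≤ e * 10 by omega)]
    omega

-- ===== PORT A =====
-- one digit pass: count, prefix sums, backward placement (all indices are in range; pyGetD/pySetD are exact there)
def radix_pass (a : List Int) (e : Int) : List Int :=
  let n := a.length
  let output : List Int := List.replicate n 0
  let count : List Int := List.replicate 10 0
  let count := a.foldl (fun c x =>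
      PySem.List.pySetD c (pyDigit e x) (PySem.List.pyGetD c (pyDigit e x) 0 + 1)) count
  let count := (PySem.List.pyRange 1 10 1).foldl (fun c i =>
      PySem.List.pySetD c i (PySem.List.pyGetD c i 0 + PySem.List.pyGetD c (i - 1) 0)) count
  let oc := (PySem.List.pyRange ((n : Int) - 1) (-1) (-1)).foldl
      (fun (oc : List Int × List Int) i =>
        let x := PySem.List.pyGetD a i 0
        let d := pyDigit e x
        (PySem.List.pySetD oc.1 (PySem.List.pyGetD oc.2 d 0 - 1) x,
         PySem.List.pySetD oc.2 d (PySem.List.pyGetD oc.2 d 0 - 1))) (output, count)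
  oc.1

def radix_loop (maxv : Int) (a : List Int) (e : Int) : List (List Int × (Int × Int)) :=
  if h : 0 < PySem.Int.floordiv maxv e then
    let a' := radix_pass a e
    (a', (-1, -1)) :: radix_loop maxv a' (e * 10)
  else [(a, (-1, -1))]
termination_by (PySem.Int.floordiv maxv e).toNat
decreasing_by exact radix_measure maxv e h

def radix_sort_steps (arr : List Int) : List (List Int × (Int × Int)) :=
  if arr.any (fun x => decide (x < 0)) then [] -- Python raises ValueError here (outside Pre_)
  else if arr = [] then [(arr, (-1, -1))]
  else radix_loop ((PySem.List.max? arr (fun y => y)).getD 0) arr 1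

-- ===== PORT B =====
-- 'passes = 0; while m > 0: passes += 1; m //= 10'
def num_passes (m : Int) : Nat :=
  if h : 0 < m then num_passes (PySem.Int.floordiv m 10) + 1 else 0
termination_by m.toNat
decreasing_by
  rw [PySem.Int.floordiv_eq_ediv_of_pos (show (0:Int) < 10 by norm_num)]
  omega

-- one digit pass: distribute forward into ten buckets, then concatenate them
def bucket_pass (a : List Int) (e : Int) : List Int :=
  let bs0 : List (List Int) := List.replicate 10 []
  let bs := a.foldl (fun bs x =>
      PySem.List.pySetD bs (PySem.Int.mod (PySem.Int.floordiv x e) 10)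
        (PySem.List.pyGetD bs (PySem.Int.mod (PySem.Int.floordiv x e) 10) [] ++ [x])) bs0
  bs.flatten

def radix_sort_steps_alt (arr : List Int) : List (List Int × (Int × Int)) :=
  if arr.any (fun x => decide (x < 0)) then [] -- Python raises ValueError here (outside Pre_)
  else if arr = [] then [(arr, (-1, -1))]
  else
    let passes := num_passes ((PySem.List.max? arr (fun y => y)).getD 0)
    let st := (List.range passes).foldl
      (fun (st : List Int × List (List Int × (Int × Int))) k =>
        let a' := bucket_pass st.1 ((10:Int) ^ k)
        (a', st.2 ++ [(a', (-1, -1))])) (arr, [])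
    st.2 ++ [(st.1, (-1, -1))]

-- ===== PRECONDITION & SPEC =====
-- Pre_ excludes exactly the inputs containing a negative integer, on which the Python A raises ValueError.
def Pre_radix_sort_steps (arr : List Int) : Prop := ∀ x ∈ arr, 0 ≤ x
instance (arr : List Int) : Decidable (Pre_radix_sort_steps arr) := by unfold Pre_radix_sort_steps; infer_instance
def pvWitness_radix_sort_steps : List Int := [170, 45, 75, 90, 2]

def Spec_radix_sort_steps (arr : List Int) (out : List (List Int × (Int × Int))) : Prop := out = radix_sort_steps_alt arr
instance (arr : List Int) (out : List (List Int × (Int × Int))) : Decidable (Spec_radix_sort_steps arr out) := by unfold Spec_radix_sort_steps; infer_instance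

-- ===== CLAIM (what is proved, stated in full; the proofs are below) =====
def Claim_equal_radix_sort_steps : Prop := ∀ (arr : List Int), Dom_radix_sort_steps arr → Pre_radix_sort_steps arr → Spec_radix_sort_steps arr (radix_sort_steps arr)

-- ===== LEMMAS AND PROOFS =====

-- digit as a Nat, always in 0..9
def dgN (e x : Int) : Nat := (pyDigit e x).toNat

theorem pyDigit_nonneg (e x : Int) : 0 ≤ pyDigit e x :=
  PySem.Int.mod_nonneg _ (by norm_num)

theorem pyDigit_lt10 (e x : Int) : pyDigit e x < 10 :=
  PySem.Int.mod_lt _ (by norm_num)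

theorem dgN_lt10 (e x : Int) : dgN e x < 10 := by
  have h1 := pyDigit_nonneg e x; have h2 := pyDigit_lt10 e x
  unfold dgN; omega

theorem cast_dgN (e x : Int) : ((dgN e x : Nat) : Int) = pyDigit e x := by
  have h1 := pyDigit_nonneg e x; unfold dgN; omega

-- the bucket predicate of digit d
def dpred (e : Int) (d : Nat) (x : Int) : Bool := pyDigit e x == (d : Int)

theorem dpred_iff (e : Int) (d : Nat) (x : Int) : dpred e d x = true ↔ dgN e x = d := by
  have h1 := pyDigit_nonneg e x
  simp only [dpred, beq_iff_eq]
  constructor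
  · intro h; unfold dgN; omega
  · intro h; rw [← cast_dgN, h]

-- number of elements of l in bucket d
def cntN (e : Int) (d : Nat) (l : List Int) : Nat := l.countP (dpred e d)

-- start offset of bucket d in the concatenation of buckets
def baseN (e : Int) (d : Nat) (a : List Int) : Nat := ((List.range d).map (fun j => cntN e j a)).sum

def buckets (e : Int) (a : List Int) : List (List Int) := (List.range 10).map (fun d => a.filter (dpred e d))

theorem cntN_cons (e : Int) (d : Nat) (x : Int) (l : List Int) :
    cntN e d (x :: l) = cntN e d l + (if dgN e x = d then 1 else 0) := by
  simp only [cntN, List.countP_cons]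
  by_cases h : dgN e x = d
  · have h2 := (dpred_iff e d x).2 h; simp [h2, h]
  · have h2 : ¬ dpred e d x = true := fun hc => h ((dpred_iff e d x).1 hc)
    simp [h2, h]

theorem cntN_append (e : Int) (d : Nat) (l1 l2 : List Int) :
    cntN e d (l1 ++ l2) = cntN e d l1 + cntN e d l2 := by
  simp [cntN, List.countP_append]

theorem cntN_reverse (e : Int) (d : Nat) (l : List Int) : cntN e d l.reverse = cntN e d l := by
  simp [cntN]

theorem baseN_succ (e : Int) (d : Nat) (a : List Int) :
    baseN e (d + 1) a = baseN e d a + cntN e d a := by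
  simp [baseN, List.range_succ]

theorem baseN_cons (e : Int) (x : Int) (t : List Int) :
    ∀ m : Nat, baseN e m (x :: t) = baseN e m t + (if dgN e x < m then 1 else 0) := by
  intro m
  induction m with
  | zero => simp [baseN]
  | succ m ih =>
      rw [baseN_succ, baseN_succ, ih, cntN_cons]
      split_ifs <;> omega

theorem baseN_ten (e : Int) (a : List Int) : baseN e 10 a = a.length := by
  induction a with
  | nil => simp [baseN, cntN]
  | cons x t ih => rw [baseN_cons, ih]; simp [dgN_lt10]

theorem baseN_mono (e : Int) (a : List Int) {d d' : Nat} (h : d ≤ d') :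
    baseN e d a ≤ baseN e d' a := by
  induction d' with
  | zero =>
      have h0 : d = 0 := by omega
      rw [h0]
  | succ m ih =>
      rcases Nat.lt_or_ge d (m+1) with h2 | h2
      · have h3 := ih (by omega); rw [baseN_succ]; omega
      · have h3 : d = m + 1 := by omega
        rw [h3]

theorem base_cnt_le (e : Int) (a : List Int) {d : Nat} (h : d < 10) :
    baseN e d a + cntN e d a ≤ a.length := by
  have h1 : baseN e (d+1) a ≤ baseN e 10 a := baseN_mono e a (by omega)
  rw [baseN_succ] at h1; rw [← baseN_ten e a]; omega

theorem coverage (e : Int) (a : List Int) :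
    ∀ k, k < a.length → ∃ d, d < 10 ∧ baseN e d a ≤ k ∧ k < baseN e d a + cntN e d a := by
  have main : ∀ m k, k < baseN e m a → ∃ d, d < m ∧ baseN e d a ≤ k ∧ k < baseN e d a + cntN e d a := by
    intro m
    induction m with
    | zero => intro k hk; simp [baseN] at hk
    | succ m ih =>
        intro k hk
        rcases Nat.lt_or_ge k (baseN e m a) with h2 | h2
        · obtain ⟨d, hd, h3, h4⟩ := ih k h2; exact ⟨d, by omega, h3, h4⟩
        · rw [baseN_succ] at hk; exact ⟨m, by omega, h2, by omega⟩
  intro k hk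
  exact main 10 k (by rw [baseN_ten]; exact hk)

-- getD helpers
theorem getD_set_self {l : List Int} {k : Nat} (h : k < l.length) (v : Int) :
    (l.set k v).getD k 0 = v := by
  simp [List.getD, h]

theorem getD_set_ne {l : List Int} {k j : Nat} (h : j ≠ k) (v : Int) :
    (l.set k v).getD j 0 = l.getD j 0 := by
  simp [List.getD, (Ne.symm h)]

theorem getD_append_left {l1 l2 : List Int} {k : Nat} (h : k < l1.length) :
    (l1 ++ l2).getD k 0 = l1.getD k 0 := by
  simp [List.getD, List.getElem?_append_left, h]

theorem getD_append_right (l1 l2 : List Int) (k : Nat) :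
    (l1 ++ l2).getD (l1.length + k) 0 = l2.getD k 0 := by
  simp [List.getD, List.getElem?_append_right]

theorem getD_replicate10 {j : Nat} (h : j < 10) : (List.replicate 10 (0:Int)).getD j 0 = 0 := by
  interval_cases j <;> rfl

-- getter of a flattened bucket list at an in-bucket offset
theorem flatten_getD : ∀ (bs : List (List Int)) (i r : Nat), r < (bs.getD i []).length →
    bs.flatten.getD (((bs.take i).map List.length).sum + r) 0 = (bs.getD i []).getD r 0 := by
  intro bs
  induction bs with
  | nil => intro i r h; simp [List.getD] at h
  | cons b bs ih =>
      intro i r h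
      cases i with
      | zero =>
          simp only [List.take_zero, List.map_nil, List.sum_nil, Nat.zero_add, List.flatten_cons]
          have hb : r < b.length := by simpa [List.getD] using h
          rw [getD_append_left hb]
          simp [List.getD]
      | succ i =>
          simp only [List.take_succ_cons, List.map_cons, List.sum_cons, List.flatten_cons]
          rw [Nat.add_assoc, getD_append_right]
          have hb : r < (bs.getD i []).length := by simpa [List.getD] using h
          have := ih i r hb
          simpa [List.getD] using this

theorem buckets_getD (e : Int) (a : List Int) {d : Nat} (h : d < 10) :
    (buckets e a).getD d [] = a.filter (dpred e d) := by
  simp [buckets, List.getD, h]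

theorem map_length_buckets (e : Int) (a : List Int) :
    (buckets e a).map List.length = (List.range 10).map (fun j => cntN e j a) := by
  unfold buckets
  rw [List.map_map]
  apply List.map_congr_left
  intro j _
  simp only [Function.comp_apply, cntN]
  exact List.countP_eq_length_filter.symm

theorem buckets_take_sum (e : Int) (a : List Int) {d : Nat} (h : d ≤ 10) :
    (((buckets e a).take d).map List.length).sum = baseN e d a := by
  unfold buckets baseN
  rw [← List.map_take, List.take_range, Nat.min_eq_left h, List.map_map]
  congr 1
  apply List.map_congr_left
  intro j _
  simp only [Function.comp_apply, cntN]
  exact List.countP_eq_length_filter.symm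

theorem flatten_buckets_len (e : Int) (a : List Int) : (buckets e a).flatten.length = a.length := by
  rw [List.length_flatten, map_length_buckets]
  have hb : ((List.range 10).map (fun j => cntN e j a)).sum = baseN e 10 a := rfl
  rw [hb, baseN_ten]

theorem Jget (e : Int) (a : List Int) {d r : Nat} (hd : d < 10) (hr : r < cntN e d a) :
    (buckets e a).flatten.getD (baseN e d a + r) 0 = (a.filter (dpred e d)).getD r 0 := by
  have h1 := buckets_getD e a hd
  have h2 := buckets_take_sum e a (d := d) (by omega)
  have h3 : r < ((buckets e a).getD d []).length := by
    rw [h1, ← List.countP_eq_length_filter]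
    exact hr
  have h4 := flatten_getD (buckets e a) d r h3
  rw [h2, h1] at h4
  exact h4

-- appending x to its bucket = buckets of the snoc
theorem length_buckets (e : Int) (l : List Int) : (buckets e l).length = 10 := by
  simp [buckets]

theorem buckets_snoc (e : Int) (pre : List Int) (x : Int) :
    buckets e (pre ++ [x]) = (buckets e pre).set (dgN e x) (pre.filter (dpred e (dgN e x)) ++ [x]) := by
  apply List.ext_getElem
  · rw [length_buckets, List.length_set, length_buckets]
  · intro d h1 h2
    rw [length_buckets] at h1
    have hget : ∀ l : List Int, (buckets e l)[d]'(by rw [length_buckets]; exact h1) = l.filter (dpred e d) := by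
      intro l; simp [buckets]
    rw [List.getElem_set]
    by_cases hd : dgN e x = d
    · rw [if_pos hd, hget (pre ++ [x]), List.filter_append]
      subst hd
      rw [List.filter_cons, if_pos ((dpred_iff e (dgN e x) x).2 rfl)]
      simp
    · rw [if_neg hd, hget (pre ++ [x]), hget pre, List.filter_append]
      rw [List.filter_cons, if_neg (fun hc => hd ((dpred_iff e d x).1 hc))]
      simp

-- B's bucket-distribution fold builds exactly the filter buckets
theorem bucket_fold (e : Int) : ∀ (a pre : List Int),
    a.foldl (fun bs x =>
      PySem.List.pySetD bs (pyDigit e x) (PySem.List.pyGetD bs (pyDigit e x) [] ++ [x])) (buckets e pre)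
    = buckets e (pre ++ a) := by
  intro a
  induction a with
  | nil => intro pre; simp
  | cons x t ih =>
      intro pre
      rw [List.foldl_cons]
      have hstep : PySem.List.pySetD (buckets e pre) (pyDigit e x)
          (PySem.List.pyGetD (buckets e pre) (pyDigit e x) [] ++ [x])
          = buckets e (pre ++ [x]) := by
        rw [← cast_dgN e x]
        simp only [PySem.List.pySetD_natCast, PySem.List.pyGetD_natCast]
        rw [buckets_getD e pre (dgN_lt10 e x), buckets_snoc]
      rw [hstep, ih (pre ++ [x]), List.append_assoc]
      rfl

theorem bucket_pass_eq_flatten (a : List Int) (e : Int) :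
    bucket_pass a e = (buckets e a).flatten := by
  unfold bucket_pass
  have h0 : (List.replicate 10 ([] : List Int)) = buckets e [] := by rfl
  rw [h0]
  exact congrArg List.flatten (bucket_fold e a [])

-- the counting loop
theorem count_fold (e : Int) (a : List Int) : ∀ c : List Int, c.length = 10 →
    (a.foldl (fun c x => PySem.List.pySetD c (pyDigit e x) (PySem.List.pyGetD c (pyDigit e x) 0 + 1)) c).length = 10 ∧
    ∀ d : Nat, d < 10 →
      (a.foldl (fun c x => PySem.List.pySetD c (pyDigit e x) (PySem.List.pyGetD c (pyDigit e x) 0 + 1)) c).getD d 0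
        = c.getD d 0 + (cntN e d a : Int) := by
  induction a with
  | nil => intro c hc; exact ⟨hc, by intro d _; simp [cntN]⟩
  | cons x t ih =>
      intro c hc
      simp only [List.foldl_cons]
      have hstep : PySem.List.pySetD c (pyDigit e x) (PySem.List.pyGetD c (pyDigit e x) 0 + 1)
          = c.set (dgN e x) (c.getD (dgN e x) 0 + 1) := by
        rw [← cast_dgN]; simp
      rw [hstep]
      obtain ⟨hl, hv⟩ := ih (c.set (dgN e x) (c.getD (dgN e x) 0 + 1)) (by simp [hc])
      refine ⟨hl, ?_⟩
      intro d hd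
      rw [hv d hd, cntN_cons]
      by_cases hdx : dgN e x = d
      · subst hdx
        rw [getD_set_self (by rw [hc]; exact dgN_lt10 e x)]
        push_cast [if_pos rfl]; ring
      · rw [getD_set_ne (fun hh => hdx hh.symm), if_neg hdx]
        push_cast; ring

-- the prefix-sum loop
def psumI (c : List Int) (m : Nat) : Int := ((List.range m).map (fun j => c.getD j 0)).sum

theorem psumI_succ (c : List Int) (m : Nat) : psumI c (m+1) = psumI c m + c.getD m 0 := by
  simp [psumI, List.range_succ]

theorem psum_eq (e : Int) (a : List Int) (c : List Int)
    (hc : ∀ j : Nat, j < 10 → c.getD j 0 = (cntN e j a : Int)) :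
    ∀ m : Nat, m ≤ 10 → psumI c m = (baseN e m a : Int) := by
  intro m
  induction m with
  | zero => intro _; simp [psumI, baseN]
  | succ m ih =>
      intro h
      rw [psumI_succ, baseN_succ, ih (by omega), hc m (by omega)]
      push_cast; ring

theorem prefix_fold_aux (k : Nat) (hk : k ≤ 9) : ∀ c : List Int, c.length = 10 →
    ((PySem.List.pyRange 1 (1 + (k:Int)) 1).foldl (fun c i =>
        PySem.List.pySetD c i (PySem.List.pyGetD c i 0 + PySem.List.pyGetD c (i - 1) 0)) c).length = 10 ∧
    ∀ d : Nat, d < 10 →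
      ((PySem.List.pyRange 1 (1 + (k:Int)) 1).foldl (fun c i =>
        PySem.List.pySetD c i (PySem.List.pyGetD c i 0 + PySem.List.pyGetD c (i - 1) 0)) c).getD d 0
        = if d ≤ k then psumI c (d+1) else c.getD d 0 := by
  induction k with
  | zero =>
      intro c hc
      rw [show (1 + ((0:Nat):Int)) = 1 by norm_num, PySem.List.pyRange_one_eq_nil (by norm_num)]
      simp only [List.foldl_nil]
      refine ⟨hc, ?_⟩
      intro d _
      by_cases hd0 : d ≤ 0
      · have hd1 : d = 0 := by omega
        subst hd1
        rw [if_pos (le_refl 0)]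
        simp [psumI, List.range_succ]
      · rw [if_neg hd0]
  | succ k ih =>
      intro c hc
      have hsplit : PySem.List.pyRange 1 (1 + ((k+1:Nat):Int)) 1
          = PySem.List.pyRange 1 (1+(k:Int)) 1 ++ [1+(k:Int)] := by
        have h := PySem.List.pyRange_one_succ_right (a := 1) (b := 1 + (k:Int)) (by omega)
        rw [← h]; congr 1
      rw [hsplit, List.foldl_append]
      obtain ⟨hl, hv⟩ := ih (by omega) c hc
      simp only [List.foldl_cons, List.foldl_nil]
      have hstep : ∀ R : List Int,
          PySem.List.pySetD R (1 + (k:Int)) (PySem.List.pyGetD R (1 + (k:Int)) 0 + PySem.List.pyGetD R ((1 + (k:Int)) - 1) 0)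
          = R.set (k+1) (R.getD (k+1) 0 + R.getD k 0) := by
        intro R
        rw [show (1 + (k:Int)) = ((k+1:Nat):Int) by push_cast; ring]
        rw [show (((k+1:Nat):Int) - 1) = ((k:Nat):Int) by push_cast; ring]
        simp only [PySem.List.pySetD_natCast, PySem.List.pyGetD_natCast]
      rw [hstep]
      have hRk1 : (List.foldl (fun c i => PySem.List.pySetD c i (PySem.List.pyGetD c i 0 + PySem.List.pyGetD c (i - 1) 0)) c (PySem.List.pyRange 1 (1+(k:Int)) 1)).getD (k+1) 0 = c.getD (k+1) 0 := by
        rw [hv (k+1) (by omega), if_neg (by omega)]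
      have hRk : (List.foldl (fun c i => PySem.List.pySetD c i (PySem.List.pyGetD c i 0 + PySem.List.pyGetD c (i - 1) 0)) c (PySem.List.pyRange 1 (1+(k:Int)) 1)).getD k 0 = psumI c (k+1) := by
        rw [hv k (by omega), if_pos (le_refl k)]
      rw [hRk1, hRk]
      refine ⟨by simp [hl], ?_⟩
      intro d hd
      by_cases hdk : d = k + 1
      · subst hdk
        rw [getD_set_self (by rw [hl]; omega), if_pos (by omega)]
        simp only [psumI_succ]
        ring
      · rw [getD_set_ne hdk, hv d hd]
        by_cases hdk2 : d ≤ k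
        · rw [if_pos hdk2, if_pos (by omega)]
        · rw [if_neg hdk2, if_neg (by omega)]

-- the backward placement loop, as a fold over a.reverse
def Fstep (e : Int) (oc : List Int × List Int) (x : Int) : List Int × List Int :=
  (PySem.List.pySetD oc.1 (PySem.List.pyGetD oc.2 (pyDigit e x) 0 - 1) x,
   PySem.List.pySetD oc.2 (pyDigit e x) (PySem.List.pyGetD oc.2 (pyDigit e x) 0 - 1))

theorem back_fold_form (a : List Int) (e : Int) (init : List Int × List Int) :
    (PySem.List.pyRange (((a.length:Nat) : Int) - 1) (-1) (-1)).foldl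
      (fun (oc : List Int × List Int) i =>
        (PySem.List.pySetD oc.1 (PySem.List.pyGetD oc.2 (pyDigit e (PySem.List.pyGetD a i 0)) 0 - 1) (PySem.List.pyGetD a i 0),
         PySem.List.pySetD oc.2 (pyDigit e (PySem.List.pyGetD a i 0)) (PySem.List.pyGetD oc.2 (pyDigit e (PySem.List.pyGetD a i 0)) 0 - 1))) init
    = a.reverse.foldl (Fstep e) init := by
  rw [PySem.List.pyRange_neg_one_eq_reverse]
  rw [show ((-1:Int)+1) = 0 by norm_num, show (((a.length:Nat):Int) - 1) + 1 = ((a.length:Nat):Int) by ring]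
  rw [show (fun (oc : List Int × List Int) (i : Int) =>
        (PySem.List.pySetD oc.1 (PySem.List.pyGetD oc.2 (pyDigit e (PySem.List.pyGetD a i 0)) 0 - 1) (PySem.List.pyGetD a i 0),
         PySem.List.pySetD oc.2 (pyDigit e (PySem.List.pyGetD a i 0)) (PySem.List.pyGetD oc.2 (pyDigit e (PySem.List.pyGetD a i 0)) 0 - 1)))
      = (fun oc i => Fstep e oc (PySem.List.pyGetD a i 0)) from rfl]
  rw [← List.foldl_map]
  rw [List.map_reverse, PySem.List.map_pyGetD_pyRange_zero']

theorem back_main (e : Int) (a : List Int) : ∀ (rev s o c : List Int),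
    rev.reverse ++ s = a → o.length = a.length → c.length = 10 →
    (∀ d : Nat, d < 10 → c.getD d 0 = (baseN e d a : Int) + (cntN e d rev : Int)) →
    (∀ d k : Nat, d < 10 → baseN e d a + cntN e d rev ≤ k → k < baseN e d a + cntN e d rev + cntN e d s →
        o.getD k 0 = (buckets e a).flatten.getD k 0) →
    (rev.foldl (Fstep e) (o, c)).1.length = a.length ∧
    ∀ k : Nat, k < a.length → (rev.foldl (Fstep e) (o, c)).1.getD k 0 = (buckets e a).flatten.getD k 0 := by
  intro rev
  induction rev with
  | nil =>
      intro s o c h1 h2 _ _ h5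
      have hs : s = a := by simpa using h1
      subst hs
      simp only [List.foldl_nil]
      refine ⟨h2, ?_⟩
      intro k hk
      obtain ⟨d, hd, hbk, hbk2⟩ := coverage e s k hk
      have h0 : cntN e d ([] : List Int) = 0 := rfl
      exact h5 d k hd (by omega) (by omega)
  | cons x rev ih =>
      intro s o c h1 h2 h3 h4 h5
      have h1' : rev.reverse ++ (x :: s) = a := by
        rw [← h1, List.reverse_cons, List.append_assoc]
        rfl
      have hdxlt : dgN e x < 10 := dgN_lt10 e x
      have hcnt_cons : cntN e (dgN e x) (x :: rev) = cntN e (dgN e x) rev + 1 := by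
        rw [cntN_cons, if_pos rfl]
      have hca : cntN e (dgN e x) a = cntN e (dgN e x) rev + 1 + cntN e (dgN e x) s := by
        rw [← h1', cntN_append, cntN_reverse, cntN_cons, if_pos rfl]
        omega
      set q : Nat := baseN e (dgN e x) a + cntN e (dgN e x) rev with hq
      have hcget : c.getD (dgN e x) 0 = ((q + 1 : Nat) : Int) := by
        rw [h4 (dgN e x) hdxlt, hcnt_cons, hq]
        push_cast; ring
      have hqlen : q < a.length := by
        have hle := base_cnt_le e a hdxlt
        omega
      have hFeq : Fstep e (o, c) x = (o.set q x, c.set (dgN e x) ((q:Nat):Int)) := by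
        unfold Fstep
        rw [← cast_dgN e x]
        simp only [PySem.List.pyGetD_natCast]
        rw [hcget, show ((q+1:Nat):Int) - 1 = ((q:Nat):Int) by push_cast; ring]
        simp only [PySem.List.pySetD_natCast]
      rw [List.foldl_cons, hFeq]
      apply ih (x :: s) (o.set q x) (c.set (dgN e x) ((q:Nat):Int)) h1' (by simp [h2]) (by simp [h3])
      · intro d hd
        by_cases hddx : d = dgN e x
        · subst hddx
          rw [getD_set_self (by rw [h3]; exact hdxlt)]
          rw [hq]; push_cast; ring
        · rw [getD_set_ne hddx, h4 d hd, cntN_cons, if_neg (fun hh => hddx hh.symm)]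
          push_cast; ring
      · intro d k hd hlo hhi
        by_cases hkq : k = q
        · subst hkq
          rw [getD_set_self (by rw [h2]; exact hqlen)]
          have hfil : a.filter (dpred e (dgN e x)) =
              rev.reverse.filter (dpred e (dgN e x)) ++ x :: s.filter (dpred e (dgN e x)) := by
            rw [← h1', List.filter_append]
            congr 1
            rw [List.filter_cons, if_pos ((dpred_iff e (dgN e x) x).2 rfl)]
          have hlen : (rev.reverse.filter (dpred e (dgN e x))).length = cntN e (dgN e x) rev := by
            rw [← cntN_reverse e (dgN e x) rev]
            exact List.countP_eq_length_filter.symm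
          have hr : cntN e (dgN e x) rev < cntN e (dgN e x) a := by omega
          have hJ := Jget e a hdxlt hr
          rw [hfil] at hJ
          have happ := getD_append_right (rev.reverse.filter (dpred e (dgN e x)))
              (x :: s.filter (dpred e (dgN e x))) 0
          rw [Nat.add_zero, hlen] at happ
          rw [happ] at hJ
          simp only [List.getD, List.getElem?_cons_zero, Option.getD_some] at hJ
          rw [← hq] at hJ
          exact hJ.symm
        · rw [getD_set_ne hkq]
          by_cases hddx : d = dgN e x
          · subst hddx
            have hxs : cntN e (dgN e x) (x :: s) = cntN e (dgN e x) s + 1 := by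
              rw [cntN_cons, if_pos rfl]
            exact h5 (dgN e x) k hd (by rw [hcnt_cons]; omega) (by rw [hcnt_cons]; omega)
          · have hcr : cntN e d (x :: rev) = cntN e d rev := by
              rw [cntN_cons, if_neg (fun hh => hddx hh.symm)]; omega
            have hcs : cntN e d (x :: s) = cntN e d s := by
              rw [cntN_cons, if_neg (fun hh => hddx hh.symm)]; omega
            exact h5 d k hd (by omega) (by omega)

-- the two digit passes agree
theorem pass_eq (a : List Int) (e : Int) : radix_pass a e = bucket_pass a e := by
  rw [bucket_pass_eq_flatten]
  unfold radix_pass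
  simp only []
  rw [back_fold_form]
  obtain ⟨hl0, hv0⟩ := count_fold e a (List.replicate 10 0) (by simp)
  rw [show (10:Int) = 1 + ((9:Nat):Int) by norm_num]
  obtain ⟨hl1, hv1⟩ := prefix_fold_aux 9 (by omega) _ hl0
  have hcc : ∀ d : Nat, d < 10 →
      ((PySem.List.pyRange 1 (1 + ((9:Nat):Int)) 1).foldl (fun c i =>
        PySem.List.pySetD c i (PySem.List.pyGetD c i 0 + PySem.List.pyGetD c (i - 1) 0))
        (a.foldl (fun c x => PySem.List.pySetD c (pyDigit e x) (PySem.List.pyGetD c (pyDigit e x) 0 + 1)) (List.replicate 10 0))).getD d 0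
      = (baseN e d a : Int) + (cntN e d a.reverse : Int) := by
    intro d hd
    rw [hv1 d hd, if_pos (by omega)]
    have hp := psum_eq e a _ (fun j hj => by rw [hv0 j hj, getD_replicate10 hj]; ring) (d+1) (by omega)
    rw [hp, baseN_succ, cntN_reverse]
    push_cast; ring
  obtain ⟨hlen, hval⟩ := back_main e a a.reverse []
      (List.replicate a.length 0) _
      (by simp) (by simp) hl1 hcc
      (by intro d k hd hlo hhi
          exfalso
          have h0 : cntN e d ([] : List Int) = 0 := rfl
          omega)
  apply List.ext_getElem (by rw [hlen, flatten_buckets_len])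
  intro i h1 h2
  have hv := hval i (by rwa [hlen] at h1)
  rwa [List.getD_eq_getElem _ 0 h1, List.getD_eq_getElem _ 0 h2] at hv

-- proof-side common form of both loops: r passes starting at exponent e, then the final state
def sim (a : List Int) (r : Nat) (e : Int) : List (List Int × (Int × Int)) :=
  match r with
  | 0 => [(a, (-1, -1))]
  | r + 1 =>
      let a' := bucket_pass a e
      (a', (-1, -1)) :: sim a' r (e * 10)

theorem floordiv_floordiv10 (m e : Int) (he : 0 < e) :
    PySem.Int.floordiv (PySem.Int.floordiv m e) 10 = PySem.Int.floordiv m (e * 10) := by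
  rw [PySem.Int.floordiv_eq_ediv_of_pos he, PySem.Int.floordiv_eq_ediv_of_pos (show (0:Int) < 10 by norm_num),
      PySem.Int.floordiv_eq_ediv_of_pos (by positivity), Int.ediv_ediv_of_nonneg (le_of_lt he)]

theorem floordiv_one (m : Int) : PySem.Int.floordiv m 1 = m := by
  rw [PySem.Int.floordiv_eq_ediv_of_pos (show (0:Int) < 1 by norm_num)]; simp

-- A's while loop produces sim with r = the number of decimal digits of m // e
theorem loopA_sim : ∀ (r : Nat) (a : List Int) (m e : Int), 0 < e →
    num_passes (PySem.Int.floordiv m e) = r → radix_loop m a e = sim a r e := by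
  intro r
  induction r with
  | zero =>
      intro a m e he hr
      rw [radix_loop.eq_def]
      split
      · next hc =>
          rw [num_passes] at hr
          rw [dif_pos hc] at hr
          omega
      · rfl
  | succ r ih =>
      intro a m e he hr
      rw [radix_loop.eq_def]
      split
      · next hc =>
          rw [num_passes, dif_pos hc, floordiv_floordiv10 m e he] at hr
          simp only [sim]
          rw [pass_eq]
          exact congrArg _ (ih (bucket_pass a e) m (e * 10) (by positivity) (by omega))
      · next hc =>
          rw [num_passes, dif_neg hc] at hr
          omega

-- B's counted for-loop produces sim starting from exponent 10^j
theorem foldB_sim : ∀ (p j : Nat) (a : List Int) (acc : List (List Int × (Int × Int))),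
    (let st := (List.range' j p).foldl
      (fun (st : List Int × List (List Int × (Int × Int))) k =>
        let a' := bucket_pass st.1 ((10:Int) ^ k)
        (a', st.2 ++ [(a', (-1, -1))])) (a, acc)
     st.2 ++ [(st.1, (-1, -1))]) = acc ++ sim a p ((10:Int) ^ j) := by
  intro p
  induction p with
  | zero => intro j a acc; simp [sim]
  | succ p ih =>
      intro j a acc
      rw [List.range'_succ, List.foldl_cons]
      have := ih (j + 1) (bucket_pass a ((10:Int) ^ j)) (acc ++ [(bucket_pass a ((10:Int) ^ j), (-1, -1))])
      simp only [] at this ⊢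
      rw [this, List.append_assoc]
      congr 1

-- ===== VERDICT (by name: the statement is the Claim_ definition above) =====
theorem radix_sort_steps_spec : Claim_equal_radix_sort_steps := by
  intro arr _ _
  unfold Spec_radix_sort_steps radix_sort_steps radix_sort_steps_alt
  split
  · rfl
  · split
    · rfl
    · have hA := loopA_sim (num_passes ((PySem.List.max? arr (fun y => y)).getD 0)) arr
        ((PySem.List.max? arr (fun y => y)).getD 0) 1 (by norm_num) (by rw [floordiv_one])
      have hB := foldB_sim (num_passes ((PySem.List.max? arr (fun y => y)).getD 0)) 0 arr []
      simp only [pow_zero] at hB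
      rw [← List.range_eq_range'] at hB
      rw [hA]
      exact hB.symm
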